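-- pv_equiv track=rewrite | github.com/comp-think/comp-think.github.io | exercises/understanding/advanced/exercise_19.py | f
-- ===== SOURCE A (Python) =====
-- def f(last_name, mat):
--    d = {}
--    i = -1
--    for c in last_name:
--        if c not in d:
--            i = i + 1
--            d[i] = c
--
--    if len(d) > 0:
--        for n in mat:
--            i = int(n) % len(d)
--            return d[i] + f(last_name[1:], mat[1:])
--
--    return "$"
-- ===== SOURCE B (Python) =====
-- def f(last_name, mat):
--     # One pass with offset indexing into the original string: step j of A's
--     # recursion picks last_name[j:][mat[j] % (len(last_name) - j)], i.e.
--     # last_name[j + mat[j] % (len(last_name) - j)].  (A's `c not in d` test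
--     # compares a str against int keys, so it is always true and the dict is
--     # just an enumeration of the current suffix.)
--     s = last_name
--     n = len(s)
--     k = min(n, len(mat))
--     picks = [s[j + mat[j] % (n - j)] for j in range(k)]
--     return "".join(picks) + "$"
-- ===== Notes on version B (the rewrite author's own statement) =====
-- stated objective: faster
-- what changed: Replaces the recursion that rebuilds a fresh dict and slices both arguments at every step with one list comprehension that indexes the original string at offset j + mat[j] % (n - j).
import Mathlib
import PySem

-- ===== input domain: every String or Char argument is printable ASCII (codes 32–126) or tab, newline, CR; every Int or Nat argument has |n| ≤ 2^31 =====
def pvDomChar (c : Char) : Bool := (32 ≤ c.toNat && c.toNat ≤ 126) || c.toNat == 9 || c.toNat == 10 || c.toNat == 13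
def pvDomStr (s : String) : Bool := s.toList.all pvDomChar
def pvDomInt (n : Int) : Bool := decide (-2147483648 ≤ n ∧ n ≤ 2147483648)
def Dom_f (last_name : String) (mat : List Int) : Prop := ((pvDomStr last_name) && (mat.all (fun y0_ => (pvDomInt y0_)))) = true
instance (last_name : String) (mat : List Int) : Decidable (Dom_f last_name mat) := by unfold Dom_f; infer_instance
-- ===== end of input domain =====

-- B replaces A's recursion (which rebuilds a dict and slices both arguments each step)
-- with one pass that indexes the original string at offset j + mat[j] % (n - j); the
-- timing run measured B faster.

-- ===== PORT A =====
-- Python's `c not in d`: d's keys are ints and c is a str; int == str is always False,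
-- so the membership test is `any(k == c for k in d)` with every comparison False.
def fKeyEqChar (_k : Int) (_c : Char) : Bool := false

-- the `for c in last_name` loop building d and the counter i
def fLoop (s : List Char) (st : PySem.Dict Int Char × Int) : PySem.Dict Int Char × Int :=
  s.foldl (fun st c =>
    if (st.1.keys.any (fun k => fKeyEqChar k c)) = false then
      (st.1.insert (st.2 + 1) c, st.2 + 1)
    else st) st

-- the recursive body; `.getD '$'` only totalizes the lookup d[i] (the key is provably
-- present: 0 ≤ i < len(d)), it is never the returned value of a reachable branch
-- Python binds d once; fLoop s (empty, -1) is a pure value, so the three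
-- references to d below are written out as the same expression
def fRec (s : List Char) (mat : List Int) : List Char :=
  if 0 < (fLoop s (PySem.Dict.empty, -1)).1.size then
    match mat with
    | [] => ['$']
    | n :: rest =>
      (((fLoop s (PySem.Dict.empty, -1)).1.get?
          (PySem.Int.mod n ((fLoop s (PySem.Dict.empty, -1)).1.size : Int))).getD '$')
        :: fRec (PySem.List.slice s (some 1) none) rest
  else ['$']

def f (last_name : String) (mat : List Int) : String :=
  String.ofList (fRec last_name.toList mat)

-- ===== PORT B =====
-- Source B: picks = [s[j + mat[j] % (n - j)] for j in range(k)]; return "".join(picks) + "$"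
-- `.getD '$'` only totalizes s[...] (the index is provably in range for j < k)
def f_alt (last_name : String) (mat : List Int) : String :=
  let s := last_name.toList
  let n := s.length
  let k := min n mat.length
  let picks := (List.range k).map (fun (j : Nat) =>
    (PySem.List.pyGet? s ((j : Int) + PySem.Int.mod (mat.getD j 0) ((n : Int) - (j : Int)))).getD '$')
  String.ofList (picks ++ ['$'])

-- ===== PRECONDITION & SPEC =====
def Spec_f (last_name : String) (mat : List Int) (out : String) : Prop := out = f_alt last_name mat
instance (last_name : String) (mat : List Int) (out : String) : Decidable (Spec_f last_name mat out) := by unfold Spec_f; infer_instance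

-- ===== CLAIM (what is proved, stated in full; the proofs are below) =====
def Claim_equal_f : Prop := ∀ (last_name : String) (mat : List Int), Dom_f last_name mat → Spec_f last_name mat (f last_name mat)

-- ===== LEMMAS AND PROOFS =====

-- the loop never takes the else-branch: the membership test is constantly false
theorem fLoop_cons (c : Char) (s : List Char) (d : PySem.Dict Int Char) (i : Int) :
    fLoop (c :: s) (d, i) = fLoop s (d.insert (i + 1) c, i + 1) := by
  simp [fLoop, fKeyEqChar]

theorem fLoop_nil (st : PySem.Dict Int Char × Int) : fLoop [] st = st := rfl

-- invariant of the dict-building loop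
theorem fLoop_spec (s : List Char) (d : PySem.Dict Int Char) (i : Int)
    (hk : ∀ k ∈ d.keys, k ≤ i) (hnd : d.keys.Nodup) :
    (fLoop s (d, i)).1.size = d.size + s.length ∧
    (∀ m : Int, (fLoop s (d, i)).1.get? m =
      if i < m ∧ m ≤ i + (s.length : Int) then s[(m - i - 1).toNat]? else d.get? m) := by
  induction s generalizing d i with
  | nil =>
    refine ⟨by simp [fLoop_nil], fun m => ?_⟩
    rw [fLoop_nil]
    split
    · next h => simp at h; omega
    · rfl
  | cons c s ih =>
    rw [fLoop_cons]
    have hfresh : d.contains (i + 1) = false := by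
      by_contra h
      have : d.contains (i + 1) = true := by
        cases hh : d.contains (i + 1) <;> simp_all
      have := (PySem.Dict.contains_iff_mem_keys d (i + 1)).1 this
      have := hk _ this
      omega
    have hk' : ∀ k ∈ (d.insert (i + 1) c).keys, k ≤ i + 1 := by
      intro k hkm
      rw [PySem.Dict.mem_keys_insert] at hkm
      rcases hkm with h | h
      · omega
      · have := hk _ h; omega
    obtain ⟨hsz, hget⟩ := ih (d.insert (i + 1) c) (i + 1) hk'
      (PySem.Dict.nodup_keys_insert d (i + 1) c hnd)
    refine ⟨?_, fun m => ?_⟩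
    · rw [hsz]
      simp [PySem.Dict.size_insert, hfresh]
      omega
    · rw [hget m, PySem.Dict.get?_insert]
      by_cases hm1 : m = i + 1
      · subst hm1
        rw [if_neg (by omega), if_pos rfl]
        rw [if_pos (show i < i + 1 ∧ i + 1 ≤ i + ((c :: s).length : Int) by simp only [List.length_cons]; push_cast; omega)]
        norm_num
      · by_cases hm : i < m ∧ m ≤ i + ((c :: s).length : Int)
        · rw [if_pos (by simp at hm ⊢; omega), if_pos (by simpa using hm)]
          have h1 : (m - i - 1).toNat = (m - (i + 1) - 1).toNat + 1 := by omega
          rw [h1, List.getElem?_cons_succ]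
        · rw [if_neg (show ¬(i + 1 < m ∧ m ≤ i + 1 + (s.length : Int)) by simp at hm; omega),
            if_neg hm1, if_neg hm]

theorem fLoop_size (s : List Char) :
    (fLoop s (PySem.Dict.empty, -1)).1.size = s.length := by
  have := (fLoop_spec s PySem.Dict.empty (-1) (by simp [PySem.Dict.keys_empty])
    (by simp [PySem.Dict.keys_empty])).1
  simpa using this

theorem fLoop_get (s : List Char) (m : Int) (h0 : 0 ≤ m) (h1 : m < s.length) :
    (fLoop s (PySem.Dict.empty, -1)).1.get? m = some (s[m.toNat]'(by omega)) := by
  have hh := (fLoop_spec s PySem.Dict.empty (-1) (by simp [PySem.Dict.keys_empty])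
    (by simp [PySem.Dict.keys_empty])).2 m
  rw [hh, if_pos (by omega)]
  have : (m - (-1) - 1).toNat = m.toNat := by omega
  rw [this, List.getElem?_eq_getElem (by omega)]

theorem fRec_nil_mat (s : List Char) : fRec s [] = ['$'] := by
  rw [fRec.eq_def]
  split <;> rfl

theorem fRec_nil_s (mat : List Int) : fRec [] mat = ['$'] := by
  rw [fRec.eq_def]
  rw [if_neg]
  simp [fLoop_size]

theorem fRec_cons (c : Char) (t : List Char) (n : Int) (rest : List Int) :
    fRec (c :: t) (n :: rest) =
      ((c :: t)[(PySem.Int.mod n ((c :: t).length : Int)).toNat]'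
        (by
          have h1 := PySem.Int.mod_nonneg n (b := ((c :: t).length : Int)) (by simp)
          have h2 := PySem.Int.mod_lt n (b := ((c :: t).length : Int)) (by simp)
          omega))
        :: fRec t rest := by
  rw [fRec.eq_def]
  have hsz := fLoop_size (c :: t)
  rw [if_pos (by rw [hsz]; simp)]
  dsimp only
  have h1 := PySem.Int.mod_nonneg n (b := ((c :: t).length : Int)) (by simp)
  have h2 := PySem.Int.mod_lt n (b := ((c :: t).length : Int)) (by simp)
  rw [show ((fLoop (c :: t) (PySem.Dict.empty, -1)).1.size : Int) = ((c :: t).length : Int) by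
    rw [hsz]]
  rw [fLoop_get (c :: t) _ h1 h2]
  simp [PySem.List.slice_from_one]

-- B's value, as a function of the char list (f_alt unfolded)
def bCore (s : List Char) (mat : List Int) : List Char :=
  ((List.range (min s.length mat.length)).map (fun (j : Nat) =>
    (PySem.List.pyGet? s ((j : Int) + PySem.Int.mod (mat.getD j 0) ((s.length : Int) - (j : Int)))).getD '$'))
    ++ ['$']

theorem fRec_eq_bCore (mat : List Int) : ∀ s : List Char, fRec s mat = bCore s mat := by
  induction mat with
  | nil => intro s; simp [fRec_nil_mat, bCore]
  | cons n rest ih =>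
    intro s
    cases s with
    | nil => simp [fRec_nil_s, bCore]
    | cons c t =>
      rw [fRec_cons, ih t, bCore, bCore]
      have hmin : min (c :: t).length (n :: rest).length = min t.length rest.length + 1 := by
        simp
      rw [hmin, List.range_succ_eq_map, List.map_cons, List.map_map, List.cons_append]
      have h1 := PySem.Int.mod_nonneg n (b := (((c :: t).length : Int))) (by simp)
      have h2 := PySem.Int.mod_lt n (b := (((c :: t).length : Int))) (by simp)
      congr 1
      · -- head element
        simp only [Nat.cast_zero, zero_add, sub_zero, List.getD_cons_zero]
        rw [PySem.List.pyGet?_of_nonneg (c :: t) h1]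
        rw [List.getElem?_eq_getElem (show (PySem.Int.mod n ((c :: t).length : Int)).toNat < (c :: t).length by omega)]
        rfl
      · -- tail: reindex j+1 on (c::t) to j on t
        congr 1
        apply List.map_congr_left
        intro j hj
        simp only [Function.comp_apply]
        have hjlt : j < min t.length rest.length := by simpa using hj
        have hmnn := PySem.Int.mod_nonneg (rest.getD j 0) (b := ((t.length : Int) - (j : Int))) (by omega)
        have hgd : (n :: rest).getD (Nat.succ j) 0 = rest.getD j 0 := rfl
        have hlen : (((c :: t).length : Int)) - ((Nat.succ j : Nat) : Int) = (t.length : Int) - (j : Int) := by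
          simp only [List.length_cons]; push_cast; ring
        rw [hgd, hlen]
        have harr : (((Nat.succ j : Nat) : Int) + PySem.Int.mod (rest.getD j 0) ((t.length : Int) - (j : Int)))
            = (((((j : Int) + PySem.Int.mod (rest.getD j 0) ((t.length : Int) - (j : Int))).toNat : Nat) : Int) + 1) := by
          omega
        rw [harr, PySem.List.pyGet?_cons_succ]
        congr 2
        omega

theorem f_eq_alt (last_name : String) (mat : List Int) : f last_name mat = f_alt last_name mat := by
  rw [f, f_alt]
  rw [fRec_eq_bCore]
  rfl

-- ===== VERDICT (by name: the statement is the Claim_ definition above) =====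
theorem f_spec : Claim_equal_f := by
  intro last_name mat _
  exact f_eq_alt last_name mat
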